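-- pv_equiv track=rewrite | github.com/wangjian2019/quantitative-trading | strategy/ai_strategy_service.py | count_consecutive_direction
-- ===== SOURCE A (Python) =====
-- def count_consecutive_direction(prices, direction):
--     """Count consecutive up/down movements"""
--     if len(prices) < 2:
--         return 0
--
--     count = 0
--     for i in range(len(prices) - 1, 0, -1):
--         if direction == 'up' and prices[i] > prices[i-1]:
--             count += 1
--         elif direction == 'down' and prices[i] < prices[i-1]:
--             count += 1
--         else:
--             break
--
--     return count
-- ===== SOURCE B (Python) =====
-- def count_consecutive_direction(prices, direction):
--     """Count consecutive up/down movements: scan all adjacent pairs FORWARD once,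
--     remembering the index of the last pair that violates the direction; the trailing
--     streak is the distance from that last violation to the end."""
--     n = len(prices)
--     if n < 2:
--         return 0
--     if direction == 'up':
--         ok = lambda a, b: b > a
--     elif direction == 'down':
--         ok = lambda a, b: b < a
--     else:
--         return 0
--     last_bad = 0
--     for i in range(1, n):
--         if not ok(prices[i-1], prices[i]):
--             last_bad = i
--     return (n - 1) - last_bad
-- ===== Notes on version B (the rewrite author's own statement) =====
-- stated objective: alternative
-- what changed: A scans pairs backward from the end and breaks at the first violation, counting as it goes; B does one forward full pass keeping only the index of the LAST violating pair and returns (n-1) - last_bad as a closed-form subtraction (no early exit, no counter).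
import Mathlib
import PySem

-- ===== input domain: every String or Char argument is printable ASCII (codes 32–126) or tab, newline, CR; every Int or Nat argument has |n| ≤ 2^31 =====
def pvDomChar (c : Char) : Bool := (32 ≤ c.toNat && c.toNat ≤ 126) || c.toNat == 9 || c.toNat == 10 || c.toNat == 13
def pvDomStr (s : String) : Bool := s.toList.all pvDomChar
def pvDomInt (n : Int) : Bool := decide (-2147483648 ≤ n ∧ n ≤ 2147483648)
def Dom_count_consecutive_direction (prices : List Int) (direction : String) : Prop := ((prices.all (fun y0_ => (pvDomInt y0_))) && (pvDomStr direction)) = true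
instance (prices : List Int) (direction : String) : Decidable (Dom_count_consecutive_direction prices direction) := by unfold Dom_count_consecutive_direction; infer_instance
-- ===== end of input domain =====

-- B replaces A's backward break-at-first-violation scan by a single forward pass that
-- keeps the index of the last violating pair and returns (n-1) - last_bad (alternative).

-- ===== PORT A =====
-- A's for-loop over range(len-1, 0, -1) with a break; the range indices are always in
-- bounds, so pyGetD's default is never used.
def pvALoop (prices : List Int) (direction : String) : List Int → Int → Int
  | [], count => count
  | i :: rest, count =>
    if direction == "up" && decide (PySem.List.pyGetD prices i 0 > PySem.List.pyGetD prices (i-1) 0) then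
      pvALoop prices direction rest (count + 1)
    else if direction == "down" && decide (PySem.List.pyGetD prices i 0 < PySem.List.pyGetD prices (i-1) 0) then
      pvALoop prices direction rest (count + 1)
    else count

def count_consecutive_direction (prices : List Int) (direction : String) : Int :=
  if (prices.length : Int) < 2 then 0
  else pvALoop prices direction (PySem.List.pyRange ((prices.length : Int) - 1) 0 (-1)) 0

-- ===== PORT B =====
-- Source B's forward loop 'for i in range(1, n): if not ok(prices[i-1], prices[i]): last_bad = i'
def pvLastBad (prices : List Int) (ok : Int → Int → Bool) (n : Int) : Int :=
  (PySem.List.pyRange 1 n 1).foldl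
    (fun lb i => if !(ok (PySem.List.pyGetD prices (i-1) 0) (PySem.List.pyGetD prices i 0)) then i else lb) 0

def count_consecutive_direction_alt (prices : List Int) (direction : String) : Int :=
  if (prices.length : Int) < 2 then 0
  else if direction == "up" then
    (prices.length : Int) - 1 - pvLastBad prices (fun a b => decide (b > a)) (prices.length : Int)
  else if direction == "down" then
    (prices.length : Int) - 1 - pvLastBad prices (fun a b => decide (b < a)) (prices.length : Int)
  else 0

-- ===== PRECONDITION & SPEC =====
def Spec_count_consecutive_direction (prices : List Int) (direction : String) (out : Int) : Prop := out = count_consecutive_direction_alt prices direction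
instance (prices : List Int) (direction : String) (out : Int) : Decidable (Spec_count_consecutive_direction prices direction out) := by unfold Spec_count_consecutive_direction; infer_instance

-- ===== CLAIM (what is proved, stated in full; the proofs are below) =====
def Claim_equal_count_consecutive_direction : Prop := ∀ (prices : List Int) (direction : String), Dom_count_consecutive_direction prices direction → Spec_count_consecutive_direction prices direction (count_consecutive_direction prices direction)

-- ===== LEMMAS AND PROOFS =====

-- A's loop with accumulator c equals c + (index of the first index failing the continue
-- condition in the traversed list, defaulting to its length)
theorem pvALoop_eq_findIdx (prices : List Int) (direction : String) (bad : Int → Bool)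
    (hbad : ∀ i, bad i =
      !((direction == "up" && decide (PySem.List.pyGetD prices i 0 > PySem.List.pyGetD prices (i-1) 0)) ||
        (direction == "down" && decide (PySem.List.pyGetD prices i 0 < PySem.List.pyGetD prices (i-1) 0)))) :
    ∀ (idxs : List Int) (c : Int),
      pvALoop prices direction idxs c = c + ((idxs.findIdx bad : Nat) : Int) := by
  intro idxs
  induction idxs with
  | nil => intro c; simp [pvALoop, List.findIdx]
  | cons i rest ih =>
    intro c
    by_cases h1 : (direction == "up" && decide (PySem.List.pyGetD prices i 0 > PySem.List.pyGetD prices (i-1) 0)) = true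
    · have hb : bad i = false := by rw [hbad]; simp [h1]
      simp [pvALoop, h1, List.findIdx_cons, hb, ih]
      omega
    · by_cases h2 : (direction == "down" && decide (PySem.List.pyGetD prices i 0 < PySem.List.pyGetD prices (i-1) 0)) = true
      · have hb : bad i = false := by rw [hbad]; simp [h2]
        simp [pvALoop, h1, h2, List.findIdx_cons, hb, ih]
        omega
      · have hb : bad i = true := by
          rw [hbad]
          simp only [Bool.not_eq_true'] at *
          simp [h1, h2]
        simp [pvALoop, h1, h2, List.findIdx_cons, hb]

-- the bridge: over indices 1..m, m minus the last index where bad holds (0 if none)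
-- equals the position of the first bad index counted from the back
theorem pvKey (bad : Int → Bool) (m : Nat) :
    (m : Int) - (PySem.List.pyRange 1 ((m : Int) + 1) 1).foldl (fun lb i => if bad i then i else lb) 0
      = ((((PySem.List.pyRange 1 ((m : Int) + 1) 1).reverse).findIdx bad : Nat) : Int) := by
  induction m with
  | zero =>
    rw [PySem.List.pyRange_one_eq_nil (by norm_num)]
    simp [List.findIdx]
  | succ k ih =>
    have hsplit : PySem.List.pyRange 1 ((k : Int) + 1 + 1) 1
        = PySem.List.pyRange 1 ((k : Int) + 1) 1 ++ [(k : Int) + 1] := by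
      have := PySem.List.pyRange_one_succ_right (a := 1) (b := (k : Int) + 1) (by omega)
      simpa using this
    push_cast
    rw [hsplit, List.foldl_append, List.reverse_append]
    simp only [List.reverse_singleton, List.singleton_append, List.foldl_cons, List.findIdx_cons]
    by_cases hb : bad ((k : Int) + 1) = true
    · simp [hb]
    · simp only [Bool.not_eq_true] at hb
      rw [if_neg (by simp [hb]), List.foldl_nil, hb]
      simp only [cond_false]
      push_cast at ih ⊢
      omega

-- for an unknown direction A's loop stops at once on a nonempty index list
theorem pvALoop_other (prices : List Int) (direction : String)
    (hu : ¬ direction = "up") (hd : ¬ direction = "down") (i : Int) (rest : List Int) :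
    pvALoop prices direction (i :: rest) 0 = 0 := by
  simp [pvALoop, hu, hd]

-- ===== VERDICT (by name: the statement is the Claim_ definition above) =====
theorem count_consecutive_direction_spec : Claim_equal_count_consecutive_direction := by
  intro prices direction _
  unfold Spec_count_consecutive_direction count_consecutive_direction count_consecutive_direction_alt
  by_cases hsmall : (prices.length : Int) < 2
  · simp [hsmall]
  · simp only [if_neg hsmall]
    have hm : ∃ m : Nat, prices.length = m + 1 ∧ 1 ≤ m := by
      refine ⟨prices.length - 1, ?_, ?_⟩ <;> omega
    obtain ⟨m, hlen, hm1⟩ := hm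
    have hrev : PySem.List.pyRange ((prices.length : Int) - 1) 0 (-1)
        = (PySem.List.pyRange 1 ((m : Int) + 1) 1).reverse := by
      rw [PySem.List.pyRange_neg_one_eq_reverse]
      norm_num [hlen]
    by_cases hu : direction = "up"
    · subst hu
      rw [hrev, pvALoop_eq_findIdx prices "up"
        (fun i => !(decide (PySem.List.pyGetD prices i 0 > PySem.List.pyGetD prices (i-1) 0)))
        (by intro i; simp)]
      have hkey := pvKey (fun i => !(decide (PySem.List.pyGetD prices i 0 > PySem.List.pyGetD prices (i-1) 0))) m
      simp only [pvLastBad, hlen, beq_self_eq_true, if_true]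
      push_cast at hkey ⊢
      omega
    · by_cases hd : direction = "down"
      · subst hd
        rw [hrev, pvALoop_eq_findIdx prices "down"
          (fun i => !(decide (PySem.List.pyGetD prices i 0 < PySem.List.pyGetD prices (i-1) 0)))
          (by intro i; simp)]
        have hkey := pvKey (fun i => !(decide (PySem.List.pyGetD prices i 0 < PySem.List.pyGetD prices (i-1) 0))) m
        simp only [pvLastBad, hlen, beq_self_eq_true, if_true,
          show (("down" : String) == "up") = false from rfl, Bool.false_eq_true, if_false]
        push_cast at hkey ⊢
        omega
      · have hne : PySem.List.pyRange ((prices.length : Int) - 1) 0 (-1)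
            = ((prices.length : Int) - 1) :: PySem.List.pyRange ((prices.length : Int) - 2) 0 (-1) := by
          rw [PySem.List.pyRange_neg_one_cons (by omega)]
          norm_num
          ring_nf
        rw [hne, pvALoop_other prices direction hu hd]
        simp [hu, hd]
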